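-- pv_equiv track=rewrite | github.com/chyt123/cosmos | coding_everyday/interview/x/redbluestring.py | red_blue_string
-- ===== SOURCE A (Python) =====
-- def red_blue_string(s, l):
--     if l >= len(s):
--         return 0
--     total = s.count('r')
--     maxx = 0
--     for i in range(0, len(s) - l + 1):
--         num_r = s[i:i + l].count('r')
--         maxx = max(maxx, num_r)
--     return total - maxx
-- ===== SOURCE B (Python) =====
-- def red_blue_string(s, l):
--     if l >= len(s):
--         return 0
--     cur = 0
--     for c in s[:l]:
--         if c == 'r':
--             cur += 1
--     total = cur
--     best = cur
--     for j in range(l, len(s)):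
--         if s[j] == 'r':
--             total += 1
--             cur += 1
--         if s[j - l] == 'r':
--             cur -= 1
--         if cur > best:
--             best = cur
--     return total - best
-- ===== Notes on version B (the rewrite author's own statement) =====
-- stated objective: faster
-- what changed: Replaced the per-position slice-and-count (each window recounted from scratch) by a single sliding-window pass that updates the window's 'r' count incrementally and accumulates the total in the same pass.
-- outside the precondition, e.g. on red_blue_string('rbr', -1): A returns 1, B raises IndexError
import Mathlib
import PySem

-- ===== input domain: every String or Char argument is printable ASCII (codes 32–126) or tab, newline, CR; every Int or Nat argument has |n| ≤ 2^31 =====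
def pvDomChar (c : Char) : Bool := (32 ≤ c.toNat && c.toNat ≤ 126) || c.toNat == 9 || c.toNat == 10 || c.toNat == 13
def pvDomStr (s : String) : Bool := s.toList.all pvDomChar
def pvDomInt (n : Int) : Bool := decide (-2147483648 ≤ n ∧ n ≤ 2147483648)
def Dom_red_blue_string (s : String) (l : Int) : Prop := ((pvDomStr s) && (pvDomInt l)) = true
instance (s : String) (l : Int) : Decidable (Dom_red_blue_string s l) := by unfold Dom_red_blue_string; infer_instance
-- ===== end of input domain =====

-- B replaces A's per-position slice-and-count by one sliding-window pass that updates the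
-- window's 'r' count incrementally (O(n) instead of O(n*l)).


-- ===== PORT A =====
def red_blue_string (s : String) (l : Int) : Int :=
  if l ≥ PySem.Str.len s then 0
  else
    let total : Int := (PySem.Str.count s "r" : Int)
    let maxx : Int := (PySem.List.pyRange 0 (PySem.Str.len s - l + 1) 1).foldl
      (fun maxx i =>
        let num_r : Int := (PySem.Str.count (PySem.Str.slice s (some i) (some (i + l))) "r" : Int)
        max maxx num_r) 0
    total - maxx

-- ===== PORT B =====
def red_blue_string_alt (s : String) (l : Int) : Int :=
  if l ≥ PySem.Str.len s then 0
  else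
    let cs := s.toList
    let cur0 : Int := (PySem.Str.slice s none (some l)).toList.foldl
      (fun cur c => if c == 'r' then cur + 1 else cur) 0
    let st := (PySem.List.pyRange l (PySem.Str.len s) 1).foldl
      (fun (st : Int × Int × Int) j =>
        let tc := if PySem.List.pyGetD cs j ' ' == 'r' then (st.1 + 1, st.2.1 + 1) else (st.1, st.2.1)
        let cur := if PySem.List.pyGetD cs (j - l) ' ' == 'r' then tc.2 - 1 else tc.2
        let best := if cur > st.2.2 then cur else st.2.2
        (tc.1, cur, best))
      (cur0, cur0, cur0)
    st.1 - st.2.2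

-- ===== PRECONDITION & SPEC =====
-- Pre_ excludes negative window lengths l, which are outside the task's natural domain:
-- there A's empty-slice behaviour happens to return the total 'r' count while B's index
-- arithmetic raises IndexError.
def Pre_red_blue_string (s : String) (l : Int) : Prop := 0 ≤ l
instance (s : String) (l : Int) : Decidable (Pre_red_blue_string s l) := by unfold Pre_red_blue_string; infer_instance
def pvWitness_red_blue_string : String × Int := ("rbrrb", 2)
def Spec_red_blue_string (s : String) (l : Int) (out : Int) : Prop := out = red_blue_string_alt s l
instance (s : String) (l : Int) (out : Int) : Decidable (Spec_red_blue_string s l out) := by unfold Spec_red_blue_string; infer_instance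

-- ===== CLAIM (what is proved, stated in full; the proofs are below) =====
def Claim_equal_red_blue_string : Prop := ∀ (s : String) (l : Int), Dom_red_blue_string s l → Pre_red_blue_string s l → Spec_red_blue_string s l (red_blue_string s l)

-- ===== LEMMAS AND PROOFS =====

-- single-character substring count is List.count
theorem pv_go_singleton (v : Char) (l : List Char) (fuel acc : Nat) (h : l.length ≤ fuel) :
    PySem.Chars.count.go [v] fuel l acc = acc + l.count v := by
  induction l generalizing fuel acc with
  | nil => cases fuel <;> simp [PySem.Chars.count.go]
  | cons c t ih =>
    cases fuel with
    | zero => simp at h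
    | succ f =>
      rw [PySem.Chars.count.go]
      simp only [List.length_cons] at *
      by_cases hc : c = v
      · simp [hc, List.isPrefixOf, ih f (acc + 1) (by omega)]; omega
      · simp [List.isPrefixOf, hc, ih f acc (by omega), Ne.symm hc]

theorem pv_count_singleton (v : Char) (s : List Char) : PySem.Chars.count s [v] = s.count v := by
  simp [PySem.Chars.count, pv_go_singleton v s s.length 0 le_rfl]

-- prefix 'r'-count
def pvC (cs : List Char) (t : Nat) : Int := ((cs.take t).count 'r' : Int)
-- window 'r'-count: the window of width L starting at t
def pvWin (cs : List Char) (L t : Nat) : Int := (((cs.drop t).take L).count 'r' : Int)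

theorem pvWin_eq_C (cs : List Char) (L t : Nat) : pvWin cs L t = pvC cs (t + L) - pvC cs t := by
  have h : cs.take (t + L) = cs.take t ++ (cs.drop t).take L := List.take_add ..
  simp [pvWin, pvC, h, List.count_append]

theorem pvC_succ (cs : List Char) (m : Nat) (hm : m < cs.length) :
    pvC cs (m + 1) = pvC cs m + (if cs.getD m ' ' = 'r' then 1 else 0) := by
  have h : cs.take (m + 1) = cs.take m ++ [cs[m]] := List.take_succ_eq_append_getElem hm
  rw [pvC, pvC, h, List.count_append, List.getD_eq_getElem cs ' ' hm]
  by_cases hr : cs[m] = 'r' <;> simp [hr]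

theorem pvWin_zero (cs : List Char) (L : Nat) : pvWin cs L 0 = pvC cs L := by
  simp [pvWin, pvC]

-- B's loop body, as in the port
def pvStep (cs : List Char) (l : Int) (st : Int × Int × Int) (j : Int) : Int × Int × Int :=
  let tc := if PySem.List.pyGetD cs j ' ' == 'r' then (st.1 + 1, st.2.1 + 1) else (st.1, st.2.1)
  let cur := if PySem.List.pyGetD cs (j - l) ' ' == 'r' then tc.2 - 1 else tc.2
  let best := if cur > st.2.2 then cur else st.2.2
  (tc.1, cur, best)

theorem pv_B_loop (cs : List Char) (L : Nat) (t : Nat) (ht : L + t ≤ cs.length) (best0 : Int) :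
    (List.range t).foldl (fun st (k : Nat) => pvStep cs (L : Int) st ((L : Int) + (k : Int)))
      (pvC cs L, pvWin cs L 0, best0)
    = (pvC cs (L + t), pvWin cs L t,
       (List.range t).foldl (fun m k => max m (pvWin cs L (k + 1))) best0) := by
  induction t generalizing best0 with
  | zero => simp [pvWin_zero]
  | succ t ih =>
    have hlt : L + t < cs.length := by omega
    rw [List.range_succ, List.foldl_append, List.foldl_append, ih (by omega) best0]
    simp only [List.foldl_cons, List.foldl_nil]
    have hcast : (L : Int) + (t : Int) = ((L + t : Nat) : Int) := by push_cast; ring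
    have hsub : ((L + t : Nat) : Int) - (L : Int) = ((t : Nat) : Int) := by push_cast; ring
    rw [pvStep, hcast, hsub, PySem.List.pyGetD_natCast, PySem.List.pyGetD_natCast]
    have e1 : pvC cs (L + (t + 1)) = pvC cs (L + t) + (if cs.getD (L + t) ' ' = 'r' then 1 else 0) :=
      pvC_succ cs (L + t) hlt
    have e2 : pvC cs (t + 1) = pvC cs t + (if cs.getD t ' ' = 'r' then 1 else 0) :=
      pvC_succ cs t (by omega)
    have w0 : pvWin cs L t = pvC cs (L + t) - pvC cs t := by
      rw [pvWin_eq_C, show t + L = L + t from by omega]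
    have w1 : pvWin cs L (t + 1) = pvC cs (L + (t + 1)) - pvC cs (t + 1) := by
      rw [pvWin_eq_C, show t + 1 + L = L + (t + 1) from by omega]
    simp only [beq_iff_eq]
    rcases eq_or_ne (cs.getD (L + t) ' ') 'r' with h1 | h1 <;>
      rcases eq_or_ne (cs.getD t ' ') 'r' with h2 | h2 <;>
      simp only [h1, h2, if_pos, if_neg, not_false_iff] at e1 e2 ⊢ <;>
      refine Prod.ext ?_ (Prod.ext ?_ ?_) <;>
      simp only [] <;>
      omega

theorem pv_maxA (cs : List Char) (L : Nat) (t : Nat) :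
    (List.range (t + 1)).foldl (fun m k => max m (pvWin cs L k)) 0
    = (List.range t).foldl (fun m k => max m (pvWin cs L (k + 1))) (pvC cs L) := by
  rw [List.range_succ_eq_map, List.foldl_cons, List.foldl_map]
  rw [max_eq_right (by rw [pvWin_zero]; simp [pvC]), pvWin_zero]

-- ===== VERDICT (by name: the statement is the Claim_ definition above) =====
theorem red_blue_string_spec : Claim_equal_red_blue_string := by
  intro s l _ hpre
  unfold Spec_red_blue_string red_blue_string red_blue_string_alt
  by_cases hge : l ≥ PySem.Str.len s
  · rw [if_pos hge, if_pos hge]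
  · rw [if_neg hge, if_neg hge]
    have hlen : PySem.Str.len s = (s.toList.length : Int) := PySem.Str.len_eq s
    have hl0 : 0 ≤ l := hpre
    obtain ⟨L, rfl⟩ : ∃ L : Nat, l = (L : Int) := ⟨l.toNat, (Int.toNat_of_nonneg hl0).symm⟩
    have hLlt : L < s.toList.length := by rw [hlen] at hge; omega
    set cs := s.toList with hcs
    set n := cs.length with hn
    -- normalize A's side
    rw [hlen]
    have hrA : PySem.List.pyRange 0 ((n : Int) - (L : Int) + 1) 1
        = (List.range (n - L + 1)).map (fun k : Nat => (0 : Int) + (k : Int)) := by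
      rw [PySem.List.pyRange_one]
      congr 2
      omega
    simp only []
    -- A's total and windows
    have hcount : PySem.Str.count s "r" = cs.count 'r' := by
      rw [PySem.Str.count_eq, show ("r" : String).toList = ['r'] from rfl, pv_count_singleton]
    have hAfun : (fun (x : Int) (y : Nat) =>
          max x ((PySem.Str.count (PySem.Str.slice s (some ((0 : Int) + (y : Int)))
            (some ((0 : Int) + (y : Int) + (L : Int)))) "r" : Int)))
        = fun (x : Int) (y : Nat) => max x (pvWin cs L y) := by
      funext x y
      rw [PySem.Str.count_eq, PySem.Str.toList_slice, show ("r" : String).toList = ['r'] from rfl]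
      simp only [PySem.Chars.slice_eq_listSlice, zero_add]
      rw [PySem.List.slice_natCast_add, pv_count_singleton]
      rfl
    rw [hrA, List.foldl_map, hAfun, hcount]
    -- B's initial window count
    have hcur0 : (PySem.Str.slice s none (some (L : Int))).toList.foldl
        (fun cur c => if c == 'r' then cur + 1 else cur) 0 = pvC cs L := by
      rw [PySem.Str.toList_slice]
      simp only [PySem.Chars.slice_eq_listSlice]
      rw [PySem.List.slice_to cs (by positivity), Int.toNat_natCast,
        PySem.List.foldl_beq_add_one, pvC, zero_add]
    rw [hcur0]
    -- B's main loop
    have hrB : PySem.List.pyRange (L : Int) (n : Int) 1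
        = (List.range (n - L)).map (fun k : Nat => (L : Int) + (k : Int)) := by
      rw [PySem.List.pyRange_one]
      congr 2
      omega
    rw [hrB, List.foldl_map]
    show (cs.count 'r' : Int)
        - (List.range (n - L + 1)).foldl (fun x y => max x (pvWin cs L y)) 0
      = ((List.range (n - L)).foldl (fun st (k : Nat) => pvStep cs (L : Int) st ((L : Int) + (k : Int)))
          (pvC cs L, pvWin cs L 0, pvC cs L)).1
        - ((List.range (n - L)).foldl (fun st (k : Nat) => pvStep cs (L : Int) st ((L : Int) + (k : Int)))
          (pvC cs L, pvWin cs L 0, pvC cs L)).2.2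
    rw [pv_B_loop cs L (n - L) (by omega) (pvC cs L)]
    rw [show L + (n - L) = n from by omega]
    rw [show pvC cs n = (cs.count 'r' : Int) from by rw [pvC, hn, List.take_length]]
    rw [pv_maxA cs L (n - L)]
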